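-- pv_equiv track=rewrite | github.com/nafisa-progga/building_code_stage-1 | viewer_streamlit.py | _esc_html_math
-- ===== SOURCE A (Python) =====
-- def _esc_html_math(s: str) -> str:
--     """
--     HTML-escape a string while preserving $...$ math regions intact.
--
--     Standard html.escape() converts '>' to '&gt;' everywhere, which breaks
--     KaTeX parsing inside math expressions like '$l_c > (70/C_w^2)$'.
--     This function only escapes characters OUTSIDE math delimiters.
--     Inside a $...$ region only '&' is escaped (always unsafe in HTML).
--     """
--     result = []
--     i = 0
--     s = str(s)
--     while i < len(s):
--         if s[i] == '$':
--             j = s.find('$', i + 1)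
--             if j == -1:
--                 result.append('$')
--                 i += 1
--             else:
--                 # Inside math: only escape & to prevent HTML entity collisions
--                 math_content = s[i:j + 1].replace('&', '&amp;')
--                 result.append(math_content)
--                 i = j + 1
--         else:
--             c = s[i]
--             if c == '&':   result.append('&amp;')
--             elif c == '<': result.append('&lt;')
--             elif c == '>': result.append('&gt;')
--             else:          result.append(c)
--             i += 1
--     return ''.join(result)
-- ===== SOURCE B (Python) =====
-- def _esc_char(c):
--     if c == '&':
--         return '&amp;'
--     elif c == '<':
--         return '&lt;'
--     elif c == '>':
--         return '&gt;'
--     else: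
--         return c
--
--
-- def _esc_html_math(s: str) -> str:
--     """Single-pass state machine: outside math, escape &, <, >; after an
--     opening '$' buffer characters until the closing '$' (then emit the math
--     with only '&' escaped); an unmatched trailing '$' is flushed at the end
--     with full escaping applied to the buffered tail."""
--     s = str(s)
--     out = []
--     buf = None  # None = outside math; list of chars = inside a '$...' region
--     for c in s:
--         if buf is not None:
--             if c == '$':
--                 out.append(('$' + ''.join(buf) + '$').replace('&', '&amp;'))
--                 buf = None
--             else:
--                 buf.append(c)
--         elif c == '$':
--             buf = []
--         else:
--             out.append(_esc_char(c))
--     if buf is not None: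
--         out.append('$')
--         out.extend(_esc_char(c) for c in buf)
--     return ''.join(out)
-- ===== Notes on version B (the rewrite author's own statement) =====
-- stated objective: alternative
-- what changed: Replaced A's index-based while loop with lookahead s.find and slicing by a single forward pass state machine that buffers characters after an opening '$' and flushes the buffer on the closing '$' (or, fully escaped, at end of string for an unmatched '$').
import Mathlib
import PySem

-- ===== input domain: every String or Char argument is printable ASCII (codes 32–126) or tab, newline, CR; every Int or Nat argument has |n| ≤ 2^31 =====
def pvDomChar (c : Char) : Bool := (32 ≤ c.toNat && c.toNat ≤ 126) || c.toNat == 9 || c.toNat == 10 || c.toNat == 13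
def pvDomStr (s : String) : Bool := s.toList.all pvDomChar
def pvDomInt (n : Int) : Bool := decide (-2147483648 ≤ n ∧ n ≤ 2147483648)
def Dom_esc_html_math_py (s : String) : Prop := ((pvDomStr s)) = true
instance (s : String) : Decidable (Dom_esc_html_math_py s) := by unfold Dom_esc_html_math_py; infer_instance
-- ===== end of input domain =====

-- B replaces A's while-loop with lookahead find/slice by a one-pass state machine
-- with a pending math buffer (objective: alternative decomposition, same cost).

-- ===== PORT A =====
-- per-character escape (the if/elif chain of A's else branch)
def escCharA (c : Char) : List Char :=
  if c = '&' then "&amp;".toList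
  else if c = '<' then "&lt;".toList
  else if c = '>' then "&gt;".toList
  else [c]

-- s.find('$', i+1) on the suffix after position i: returns the chars strictly
-- between i and the found '$' plus the remainder after it (none = -1)
def escFindD : List Char → Option (List Char × List Char)
  | [] => none
  | c :: rest =>
    if c = '$' then some ([], rest)
    else
      match escFindD rest with
      | none => none
      | some (b, a) => some (c :: b, a)

theorem escFindD_some_length {cs b a : List Char} (h : escFindD cs = some (b, a)) :
    a.length < cs.length := by
  induction cs generalizing b a with
  | nil => simp [escFindD] at h
  | cons c rest ih =>
    by_cases hc : c = '$'
    · simp [escFindD, hc] at h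
      simp [← h.2]
    · simp only [escFindD, if_neg hc] at h
      cases heq : escFindD rest with
      | none => rw [heq] at h; simp at h
      | some p =>
        rw [heq] at h
        cases p with
        | mk b' a' =>
          simp at h
          have := ih (b := b') (a := a') heq
          simp [← h.2]
          omega

-- A's while loop, as recursion on the suffix of s starting at index i
def escAgo : List Char → List Char
  | [] => []
  | c :: rest =>
    if c = '$' then
      match h : escFindD rest with
      | none => '$' :: escAgo rest
      | some (b, a) =>
        PySem.Chars.replace ('$' :: (b ++ ['$'])) ['&'] "&amp;".toList ++ escAgo a
    else escCharA c ++ escAgo rest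
termination_by cs => cs.length
decreasing_by
  · simp
  · simpa using Nat.lt_succ_of_lt (escFindD_some_length h)
  · simp

def esc_html_math_py (s : String) : String := String.mk (escAgo s.toList)

-- ===== PORT B =====
-- per-character escape (_esc_char in Source B)
def escCharB (c : Char) : List Char :=
  if c = '&' then "&amp;".toList
  else if c = '<' then "&lt;".toList
  else if c = '>' then "&gt;".toList
  else [c]

-- one step of B's for loop; state = (output, pending math buffer or none)
def escBstep (st : List Char × Option (List Char)) (c : Char) :
    List Char × Option (List Char) :=
  match st with
  | (out, some buf) =>
    if c = '$' then
      (out ++ PySem.Chars.replace ('$' :: (buf ++ ['$'])) ['&'] "&amp;".toList, none)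
    else (out, some (buf ++ [c]))
  | (out, none) =>
    if c = '$' then (out, some [])
    else (out ++ escCharB c, none)

-- the final 'if buf is not None' flush of Source B
def escBfin (st : List Char × Option (List Char)) : List Char :=
  match st with
  | (out, none) => out
  | (out, some buf) => out ++ '$' :: buf.flatMap escCharB

def esc_html_math_py_alt (s : String) : String :=
  String.mk (escBfin (s.toList.foldl escBstep ([], none)))

-- ===== PRECONDITION & SPEC =====
def Spec_esc_html_math_py (s : String) (out : String) : Prop := out = esc_html_math_py_alt s
instance (s : String) (out : String) : Decidable (Spec_esc_html_math_py s out) := by unfold Spec_esc_html_math_py; infer_instance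

-- ===== CLAIM (what is proved, stated in full; the proofs are below) =====
def Claim_equal_esc_html_math_py : Prop := ∀ (s : String), Dom_esc_html_math_py s → Spec_esc_html_math_py s (esc_html_math_py s)

-- ===== LEMMAS AND PROOFS =====

theorem escCharB_eq_escCharA : escCharB = escCharA := rfl

theorem escFindD_none_no_dollar {cs : List Char} (h : escFindD cs = none) : '$' ∉ cs := by
  induction cs with
  | nil => simp
  | cons c rest ih =>
    by_cases hc : c = '$'
    · simp [escFindD, hc] at h
    · simp only [escFindD, if_neg hc] at h
      cases heq : escFindD rest with
      | none =>
        intro hmem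
        rcases List.mem_cons.mp hmem with h1 | h2
        · exact hc h1.symm
        · exact (ih heq) h2
      | some p => rw [heq] at h; cases p; simp at h

theorem escFindD_some_decomp {cs b a : List Char} (h : escFindD cs = some (b, a)) :
    cs = b ++ '$' :: a ∧ '$' ∉ b := by
  induction cs generalizing b a with
  | nil => simp [escFindD] at h
  | cons c rest ih =>
    by_cases hc : c = '$'
    · simp [escFindD, hc] at h
      simp [hc, h.1, h.2]
    · simp only [escFindD, if_neg hc] at h
      cases heq : escFindD rest with
      | none => rw [heq] at h; simp at h
      | some p =>
        rw [heq] at h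
        cases p with
        | mk b' a' =>
          simp at h
          obtain ⟨hb, ha⟩ := h
          obtain ⟨hdec, hnd⟩ := ih (b := b') (a := a') heq
          subst hb ha
          refine ⟨by simp [hdec], ?_⟩
          intro hmem
          rcases List.mem_cons.mp hmem with h1 | h2
          · exact hc h1.symm
          · exact hnd h2

-- equation lemmas for escAgo
theorem escAgo_nil : escAgo [] = [] := by rw [escAgo]

theorem escAgo_cons_ne {c : Char} (rest : List Char) (hc : c ≠ '$') :
    escAgo (c :: rest) = escCharA c ++ escAgo rest := by
  rw [escAgo]; simp [hc]

theorem escAgo_dollar_none {rest : List Char} (h : escFindD rest = none) :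
    escAgo ('$' :: rest) = '$' :: escAgo rest := by
  rw [escAgo]
  split
  · split <;> simp_all
  · simp_all

theorem escAgo_dollar_some {rest b a : List Char} (h : escFindD rest = some (b, a)) :
    escAgo ('$' :: rest) =
      PySem.Chars.replace ('$' :: (b ++ ['$'])) ['&'] "&amp;".toList ++ escAgo a := by
  rw [escAgo]
  split
  · split <;> simp_all
  · simp_all

-- A on a dollar-free string escapes character by character
theorem escAgo_no_dollar {cs : List Char} (h : '$' ∉ cs) :
    escAgo cs = cs.flatMap escCharA := by
  induction cs with
  | nil => simp [escAgo_nil]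
  | cons c rest ih =>
    have hc : c ≠ '$' := fun he => h (by simp [he])
    have hrest : '$' ∉ rest := fun hm => h (by simp [hm])
    simp [escAgo_cons_ne rest hc, ih hrest]

-- B's fold in buffer mode over a dollar-free segment just appends to the buffer
theorem foldB_in {b : List Char} (hb : '$' ∉ b) (out buf : List Char) :
    b.foldl escBstep (out, some buf) = (out, some (buf ++ b)) := by
  induction b generalizing buf with
  | nil => simp
  | cons c rest ih =>
    have hc : c ≠ '$' := fun he => hb (by simp [he])
    have hrest : '$' ∉ rest := fun hm => hb (by simp [hm])
    simp only [List.foldl_cons, escBstep, if_neg hc]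
    rw [ih hrest]
    simp

-- main invariant: finalizing B's fold started outside math reproduces A's result
theorem foldB_main : ∀ (n : Nat) (cs : List Char), cs.length ≤ n → ∀ (out : List Char),
    escBfin (cs.foldl escBstep (out, none)) = out ++ escAgo cs := by
  intro n
  induction n with
  | zero =>
    intro cs hlen out
    have : cs = [] := List.eq_nil_of_length_eq_zero (Nat.le_zero.mp hlen)
    subst this
    simp [escBfin, escAgo_nil]
  | succ n ih =>
    intro cs hlen out
    cases cs with
    | nil => simp [escBfin, escAgo_nil]
    | cons c rest =>
      by_cases hc : c = '$'
      · subst hc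
        simp only [List.foldl_cons, escBstep, reduceIte]
        cases heq : escFindD rest with
        | none =>
          have hnd : '$' ∉ rest := escFindD_none_no_dollar heq
          rw [foldB_in hnd out []]
          simp only [List.nil_append, escBfin]
          rw [escAgo_dollar_none heq, escAgo_no_dollar hnd, escCharB_eq_escCharA]
        | some p =>
          cases p with
          | mk b a =>
            obtain ⟨hdec, hndb⟩ := escFindD_some_decomp heq
            subst hdec
            rw [List.foldl_append, foldB_in hndb out []]
            simp only [List.nil_append, List.foldl_cons, escBstep, reduceIte]
            have hal : a.length ≤ n := by
              have := hlen; simp at this; omega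
            rw [ih a hal _]
            rw [escAgo_dollar_some heq]
            simp
      · simp only [List.foldl_cons, escBstep, if_neg hc]
        have : rest.length ≤ n := by simp at hlen; omega
        rw [ih rest this _]
        rw [escAgo_cons_ne rest hc, escCharB_eq_escCharA]
        simp

-- ===== VERDICT (by name: the statement is the Claim_ definition above) =====
theorem esc_html_math_py_spec : Claim_equal_esc_html_math_py := by
  intro s _
  unfold Spec_esc_html_math_py esc_html_math_py esc_html_math_py_alt
  rw [foldB_main s.toList.length s.toList le_rfl []]
  simp
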